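-- pv_equiv track=rewrite | github.com/pnnl/GLIMPSE | local-server/server_2.py | get_multi_coordinate
-- ===== SOURCE A (Python) =====
-- def get_multi_coordinate(coords: list):
--    if len(coords) == 0:
--       return None
--
--    if len(coords) <= 2:
--       return max(coords)
--
--    counts = {}
--    for item in coords:
--       counts[item] = counts.get(item, 0) + 1
--    for item, count in counts.items():
--       if count >= 2:
--          return item
-- ===== SOURCE B (Python) =====
-- def get_multi_coordinate(coords: list):
--     if len(coords) == 0:
--         return None
--     if len(coords) <= 2:
--         return max(coords)
--     rest = coords
--     while rest:
--         head, rest = rest[0], rest[1:]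
--         if head in rest:
--             return head
--     return None
-- ===== Notes on version B (the rewrite author's own statement) =====
-- stated objective: alternative
-- what changed: Dropped the count dictionary and the scan over dict items entirely: B peels the list head by head and returns the first element that occurs again in the remaining tail (the earliest first occurrence of a duplicate), trading A's hashing passes for a direct membership scan.
import Mathlib
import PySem

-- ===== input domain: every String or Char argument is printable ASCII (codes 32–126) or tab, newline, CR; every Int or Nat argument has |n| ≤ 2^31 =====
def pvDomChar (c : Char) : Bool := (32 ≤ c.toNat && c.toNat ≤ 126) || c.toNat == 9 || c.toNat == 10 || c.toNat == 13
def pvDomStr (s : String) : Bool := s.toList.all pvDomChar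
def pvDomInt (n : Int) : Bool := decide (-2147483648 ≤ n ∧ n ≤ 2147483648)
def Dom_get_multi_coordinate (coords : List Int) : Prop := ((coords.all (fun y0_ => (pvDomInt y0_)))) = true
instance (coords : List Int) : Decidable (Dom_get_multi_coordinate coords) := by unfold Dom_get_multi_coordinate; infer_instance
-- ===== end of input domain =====

-- B drops A's count dictionary and dict-items scan entirely: it peels the list head by head and
-- returns the first element that occurs again in the remaining tail (objective: alternative).

-- ===== PORT A =====
def get_multi_coordinate (coords : List Int) : Option Int :=
  if coords.length = 0 then none
  else if coords.length ≤ 2 then PySem.List.max? coords (fun y => y)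
  else
    ((coords.foldl (fun d item => d.insert item (d.getD item 0 + 1))
        (PySem.Dict.empty : PySem.Dict Int Int)).items.find? (fun p => decide (p.2 ≥ 2))).map Prod.fst

-- ===== PORT B =====
-- the 'while rest:' loop of Source B: pop the head, return it if it occurs in the remaining tail
def pvGoB (rest : List Int) : Option Int :=
  match rest with
  | [] => none
  | head :: rest' => if rest'.contains head then some head else pvGoB rest'

def get_multi_coordinate_alt (coords : List Int) : Option Int :=
  if coords.length = 0 then none
  else if coords.length ≤ 2 then PySem.List.max? coords (fun y => y)
  else pvGoB coords

-- ===== PRECONDITION & SPEC =====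
def Spec_get_multi_coordinate (coords : List Int) (out : Option Int) : Prop := out = get_multi_coordinate_alt coords
instance (coords : List Int) (out : Option Int) : Decidable (Spec_get_multi_coordinate coords out) := by unfold Spec_get_multi_coordinate; infer_instance

-- ===== CLAIM (what is proved, stated in full; the proofs are below) =====
def Claim_equal_get_multi_coordinate : Prop := ∀ (coords : List Int), Dom_get_multi_coordinate coords → Spec_get_multi_coordinate coords (get_multi_coordinate coords)

-- ===== LEMMAS AND PROOFS =====

-- find? is determined by the predicate's values on the list's members
theorem find?_congr_mem {α : Type} (l : List α) (p q : α → Bool)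
    (h : ∀ x ∈ l, p x = q x) : l.find? p = l.find? q := by
  induction l with
  | nil => rfl
  | cons y t ih =>
    simp only [List.find?_cons]
    rw [h y (List.mem_cons_self), ih (fun x hx => h x (List.mem_cons_of_mem y hx))]

-- find? over the first-occurrence dedup equals find? over the list itself.
theorem find?_set_ofList (l : List Int) (p : Int → Bool) :
    (PySem.Set.ofList l).find? p = l.find? p := by
  induction l using List.reverseRecOn with
  | nil => rfl
  | append_singleton t y ih =>
    rw [PySem.Set.ofList_eq_foldl, List.foldl_append, List.foldl_cons, List.foldl_nil,
        ← PySem.Set.ofList_eq_foldl]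
    unfold PySem.Set.add
    by_cases hc : PySem.Set.contains (PySem.Set.ofList t) y
    · rw [if_pos hc, ih, List.find?_append]
      have hyt : y ∈ t := by simpa [PySem.Set.contains, PySem.Set.mem_ofList] using hc
      cases hf : t.find? p with
      | some v => rfl
      | none =>
        have hpy : p y = false := by simpa using List.find?_eq_none.mp hf y hyt
        simp [hpy]
    · rw [if_neg hc, List.find?_append, List.find?_append, ih]

-- B's loop returns the first element whose count in the whole (remaining) list is ≥ 2.
theorem goB_eq_find (l : List Int) :
    pvGoB l = l.find? (fun k => decide (2 ≤ l.count k)) := by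
  induction l with
  | nil => rfl
  | cons h t ih =>
    by_cases hm : h ∈ t
    · have hc : 2 ≤ (h :: t).count h := by
        have := List.count_pos_iff.mpr hm
        simp only [List.count_cons_self]
        omega
      simp [pvGoB, List.find?_cons, hm, hc]
    · have hc0 : t.count h = 0 := List.count_eq_zero.mpr hm
      have hph : (decide (2 ≤ (h :: t).count h)) = false := by
        simp [List.count_cons_self, hc0]
      have hcongr : t.find? (fun k => decide (2 ≤ (h :: t).count k))
          = t.find? (fun k => decide (2 ≤ t.count k)) := by
        apply find?_congr_mem
        intro x hx
        have hxh : ¬ h = x := by rintro rfl; exact hm hx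
        simp [List.count_cons, hxh]
      have hcont : t.contains h = false := by simpa using hm
      simp only [pvGoB, hcont, Bool.false_eq_true, if_false, List.find?_cons, hph, ih, hcongr]

theorem get_multi_coordinate_eq_alt (coords : List Int) :
    get_multi_coordinate coords = get_multi_coordinate_alt coords := by
  unfold get_multi_coordinate get_multi_coordinate_alt
  by_cases h0 : coords.length = 0
  · simp [h0]
  · rw [if_neg h0, if_neg h0]
    by_cases h2 : coords.length ≤ 2
    · rw [if_pos h2, if_pos h2]
    · rw [if_neg h2, if_neg h2]
      rw [PySem.Dict.foldl_insert_getD_add_one_eq_counter, PySem.Dict.items_counter,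
          List.find?_map]
      have hA : ((fun p => decide ((p : Int × Int).2 ≥ 2)) ∘ (fun k => (k, (coords.count k : Int))))
          = (fun k => decide (2 ≤ coords.count k)) := by
        funext x
        simp [ge_iff_le]
      rw [hA, find?_set_ofList, goB_eq_find]
      cases coords.find? (fun k => decide (2 ≤ coords.count k)) <;> simp

-- ===== VERDICT (by name: the statement is the Claim_ definition above) =====
theorem get_multi_coordinate_spec : Claim_equal_get_multi_coordinate := by
  intro coords _
  unfold Spec_get_multi_coordinate
  exact get_multi_coordinate_eq_alt coords
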